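-- pv_equiv track=rewrite | github.com/Heavenfather/EnhanceExcel2Anything | src/core/excel_reader.py | __process_base_part
-- ===== SOURCE A (Python) =====
-- def __process_base_part(s: str) -> str:
--     """处理基数部分的分隔符"""
--     # 统计所有分隔符
--     separators = [i for i, c in enumerate(s) if c in ',.']
--
--     # 没有分隔符直接返回
--     if not separators:
--         return s
--
--     # 以最后一个分隔符作为小数点
--     last_sep_pos = separators[-1]
--     parts = []
--     for i, c in enumerate(s):
--         if c in ',.':
--             if i == last_sep_pos:
--                 parts.append('.')
--             else:  # 移除非小数点分隔符
--                 continue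
--         else:
--             parts.append(c)
--     return ''.join(parts)
-- ===== SOURCE B (Python) =====
-- def __process_base_part(s: str) -> str:
--     """处理基数部分的分隔符"""
--     i = max(s.rfind(','), s.rfind('.'))
--     if i == -1:
--         return s
--     # everything after the last separator is separator-free; clean only the prefix
--     return ''.join(c for c in s[:i] if c not in ',.') + '.' + s[i + 1:]
-- ===== Notes on version B (the rewrite author's own statement) =====
-- stated objective: simpler
-- what changed: Replaces A's two passes (index-collecting comprehension plus a per-character branch-and-append loop) by locating the last separator with rfind and rebuilding the string from slices: the prefix cleaned of all separators, then a decimal point, then the verbatim suffix.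
import Mathlib
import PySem

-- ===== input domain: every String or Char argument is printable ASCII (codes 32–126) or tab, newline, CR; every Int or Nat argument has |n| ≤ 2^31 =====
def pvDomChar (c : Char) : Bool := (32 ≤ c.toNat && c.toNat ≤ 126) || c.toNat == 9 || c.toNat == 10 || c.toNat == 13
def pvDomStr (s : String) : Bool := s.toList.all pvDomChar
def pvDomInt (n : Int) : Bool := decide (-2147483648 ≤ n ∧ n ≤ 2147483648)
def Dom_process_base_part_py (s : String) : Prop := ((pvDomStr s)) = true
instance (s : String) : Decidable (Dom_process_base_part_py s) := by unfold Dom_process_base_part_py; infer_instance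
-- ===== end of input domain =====

-- B replaces A's per-character branch loop by locating the last separator with rfind and
-- rebuilding from slices (clean prefix + '.' + verbatim suffix); objective: simpler.

-- ===== PORT A =====
def process_base_part_py (s : String) : String :=
  -- separators = [i for i, c in enumerate(s) if c in ',.']
  let separators : List Int :=
    (PySem.List.enumerate s.toList).filterMap
      (fun ic => if ic.2 = ',' ∨ ic.2 = '.' then some ic.1 else none)
  -- if not separators: return s
  if separators.isEmpty then s
  else
    -- last_sep_pos = separators[-1]
    let last_sep_pos : Int := separators.getLast!
    -- the parts loop: append '.' at last_sep_pos, skip other separators, keep other chars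
    let parts : List Char :=
      (PySem.List.enumerate s.toList).foldl
        (fun acc ic =>
          if ic.2 = ',' ∨ ic.2 = '.' then
            if ic.1 = last_sep_pos then acc ++ ['.'] else acc
          else acc ++ [ic.2]) []
    -- ''.join(parts)
    String.mk parts

-- ===== PORT B =====
def process_base_part_py_alt (s : String) : String :=
  -- i = max(s.rfind(','), s.rfind('.'))
  let i : Int := max (PySem.Str.rfind s ",") (PySem.Str.rfind s ".")
  -- if i == -1: return s
  if i = -1 then s
  else
    -- ''.join(c for c in s[:i] if c not in ',.') + '.' + s[i+1:]
    -- (the string concatenation of the three ASCII pieces, built at code-point level: exact)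
    String.mk
      (((PySem.List.slice s.toList none (some i)).filter
          (fun c => decide (¬ (c = ',' ∨ c = '.'))))
        ++ '.' :: PySem.List.slice s.toList (some (i + 1)) none)

-- ===== PRECONDITION & SPEC =====
def Spec_process_base_part_py (s : String) (out : String) : Prop := out = process_base_part_py_alt s
instance (s : String) (out : String) : Decidable (Spec_process_base_part_py s out) := by unfold Spec_process_base_part_py; infer_instance

-- ===== CLAIM (what is proved, stated in full; the proofs are below) =====
def Claim_equal_process_base_part_py : Prop := ∀ (s : String), Dom_process_base_part_py s → Spec_process_base_part_py s (process_base_part_py s)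

-- ===== LEMMAS AND PROOFS =====

/-- proof-side abbreviation for the separator test -/
def isSep (c : Char) : Bool := c == ',' || c == '.'

theorem isSep_iff (c : Char) : isSep c = true ↔ c = ',' ∨ c = '.' := by
  simp [isSep]

/-- index of the LAST separator of the list, if any -/
def lastSep? : List Char → Option Nat
  | [] => none
  | c :: cs =>
    match lastSep? cs with
    | some j => some (j + 1)
    | none => if isSep c then some 0 else none

theorem lastSep?_eq_none_iff (cs : List Char) :
    lastSep? cs = none ↔ ∀ c ∈ cs, isSep c = false := by
  induction cs with
  | nil => simp [lastSep?]
  | cons c cs ih =>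
    cases h : lastSep? cs with
    | some j =>
      simp only [lastSep?, h]
      constructor
      · intro h2; cases h2
      · intro h2
        have : lastSep? cs = none := ih.mpr fun d hd => h2 d (List.mem_cons_of_mem _ hd)
        rw [this] at h; cases h
    | none =>
      by_cases hc : isSep c = true
      · simp only [lastSep?, h, hc, if_true]
        constructor
        · intro h2; cases h2
        · intro h2; exact absurd hc (by simp [h2 c (List.mem_cons_self)])
      · simp only [lastSep?, h, hc, if_false, Bool.false_eq_true]
        constructor
        · intro _ d hd
          rcases List.mem_cons.mp hd with rfl | hd'
          · exact Bool.eq_false_iff.mpr hc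
          · exact ih.mp h d hd'
        · intro _; trivial

theorem lastSep?_mem (cs : List Char) (j : Nat) (h : lastSep? cs = some j) :
    ∃ c, cs[j]? = some c ∧ isSep c = true := by
  induction cs generalizing j with
  | nil => simp [lastSep?] at h
  | cons c cs ih =>
    cases hcs : lastSep? cs with
    | some j' =>
      simp only [lastSep?, hcs] at h
      obtain ⟨d, hd, hsep⟩ := ih j' hcs
      cases h
      exact ⟨d, by simpa using hd, hsep⟩
    | none =>
      by_cases hc : isSep c = true
      · simp only [lastSep?, hcs, hc, if_true] at h
        cases h
        exact ⟨c, rfl, hc⟩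
      · simp only [lastSep?, hcs, hc, if_false, Bool.false_eq_true] at h
        cases h

theorem lastSep?_last (cs : List Char) (j : Nat) (h : lastSep? cs = some j) :
    ∀ k, j < k → ∀ c, cs[k]? = some c → isSep c = false := by
  induction cs generalizing j with
  | nil => simp [lastSep?] at h
  | cons c cs ih =>
    intro k hk d hd
    cases hcs : lastSep? cs with
    | some j' =>
      simp only [lastSep?, hcs] at h
      cases h
      cases k with
      | zero => omega
      | succ k' => exact ih j' hcs k' (by omega) d (by simpa using hd)
    | none =>
      by_cases hc : isSep c = true
      · simp only [lastSep?, hcs, hc, if_true] at h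
        cases h
        cases k with
        | zero => omega
        | succ k' =>
          have hall := (lastSep?_eq_none_iff cs).mp hcs
          exact hall d (List.mem_of_getElem? (by simpa using hd))
      · simp only [lastSep?, hcs, hc, if_false, Bool.false_eq_true] at h
        cases h

/-- `[c].isPrefixOf l` means `l` starts with `c` -/
theorem singleton_isPrefixOf (c : Char) (l : List Char) :
    [c].isPrefixOf l = true ↔ l.head? = some c := by
  cases l with
  | nil => simp [List.isPrefixOf]
  | cons a t =>
    show (c == a && List.isPrefixOf [] t) = true ↔ (a :: t).head? = some c
    have h0 : List.isPrefixOf ([] : List Char) t = true := by cases t <;> rfl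
    simp only [h0, Bool.and_true, List.head?_cons, Option.some_inj, beq_iff_eq]
    exact eq_comm

/-- upper characterisation of `rfind.go` for a single-character needle -/
theorem rfind_go_ub (s : List Char) (c : Char) (k : Nat) :
    PySem.Chars.rfind.go s [c] k = -1 ∨
      ∃ j : Nat, PySem.Chars.rfind.go s [c] k = (j : Int) ∧ j ≤ k ∧ s[j]? = some c := by
  induction k with
  | zero =>
    by_cases h : [c].isPrefixOf s = true
    · right
      refine ⟨0, ?_, le_refl _, ?_⟩
      · simp [PySem.Chars.rfind.go, h]
      · have := (singleton_isPrefixOf c s).mp h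
        simpa [← List.head?_drop] using this
    · left; simp [PySem.Chars.rfind.go, h]
  | succ k ih =>
    by_cases h : [c].isPrefixOf (s.drop (k + 1)) = true
    · right
      refine ⟨k + 1, ?_, le_refl _, ?_⟩
      · simp [PySem.Chars.rfind.go, h]
      · have := (singleton_isPrefixOf c _).mp h
        simpa [List.head?_drop] using this
    · have heq : PySem.Chars.rfind.go s [c] (k + 1) = PySem.Chars.rfind.go s [c] k := by
        simp [PySem.Chars.rfind.go, h]
      rcases ih with h1 | ⟨j, hj, hjk, hc⟩
      · left; rw [heq]; exact h1
      · right; exact ⟨j, by rw [heq]; exact hj, by omega, hc⟩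

/-- lower bound: any occurrence at `j ≤ k` forces `go ≥ j` -/
theorem rfind_go_lb (s : List Char) (c : Char) (k j : Nat) (hjk : j ≤ k)
    (hc : s[j]? = some c) : (j : Int) ≤ PySem.Chars.rfind.go s [c] k := by
  induction k with
  | zero =>
    have hj0 : j = 0 := by omega
    subst hj0
    have : [c].isPrefixOf s = true := by
      rw [singleton_isPrefixOf]
      simpa [← List.head?_drop] using hc
    simp [PySem.Chars.rfind.go, this]
  | succ k ih =>
    by_cases h : [c].isPrefixOf (s.drop (k + 1)) = true
    · have hgo : PySem.Chars.rfind.go s [c] (k + 1) = ((k + 1 : Nat) : Int) := by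
        simp [PySem.Chars.rfind.go, h]
      rw [hgo]; exact_mod_cast hjk
    · have heq : PySem.Chars.rfind.go s [c] (k + 1) = PySem.Chars.rfind.go s [c] k := by
        simp [PySem.Chars.rfind.go, h]
      rw [heq]
      rcases Nat.lt_or_ge j (k + 1) with hlt | hge
      · exact ih (by omega)
      · exfalso
        have hj : j = k + 1 := by omega
        subst hj
        exact h ((singleton_isPrefixOf c _).mpr (by simpa [List.head?_drop] using hc))

theorem rfind_char_eq_go (s : List Char) (c : Char) :
    PySem.Chars.rfind s [c] = PySem.Chars.rfind.go s [c] s.length := rfl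

/-- the B-side index: max of the two rfinds equals the last separator index -/
theorem max_rfind_eq (cs : List Char) :
    max (PySem.Chars.rfind cs [',']) (PySem.Chars.rfind cs ['.']) =
      (match lastSep? cs with
       | none => (-1 : Int)
       | some j => (j : Int)) := by
  cases hls : lastSep? cs with
  | none =>
    have hall := (lastSep?_eq_none_iff cs).mp hls
    have h1 : PySem.Chars.rfind cs [','] = -1 := by
      rw [rfind_char_eq_go]
      rcases rfind_go_ub cs ',' cs.length with h | ⟨j, hj, hjk, hc⟩
      · exact h
      · exact absurd (hall ',' (List.mem_of_getElem? hc)) (by simp [isSep])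
    have h2 : PySem.Chars.rfind cs ['.'] = -1 := by
      rw [rfind_char_eq_go]
      rcases rfind_go_ub cs '.' cs.length with h | ⟨j, hj, hjk, hc⟩
      · exact h
      · exact absurd (hall '.' (List.mem_of_getElem? hc)) (by simp [isSep])
    simp [h1, h2]
  | some j =>
    obtain ⟨c0, hc0, hsep0⟩ := lastSep?_mem cs j hls
    have hjlen : j < cs.length := by
      by_contra hge
      rw [List.getElem?_eq_none (by omega)] at hc0
      cases hc0
    have hub : ∀ c, isSep c = true → PySem.Chars.rfind cs [c] ≤ (j : Int) := by
      intro c hc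
      rw [rfind_char_eq_go]
      rcases rfind_go_ub cs c cs.length with h | ⟨j', hj', _, hcj'⟩
      · rw [h]; omega
      · rw [hj']
        by_contra hgt
        have hjj' : j < j' := by omega
        have := lastSep?_last cs j hls j' hjj' c hcj'
        rw [hc] at this
        cases this
    have hlow : (j : Int) ≤ max (PySem.Chars.rfind cs [',']) (PySem.Chars.rfind cs ['.']) := by
      rcases (isSep_iff c0).mp hsep0 with rfl | rfl
      · exact le_trans (by rw [rfind_char_eq_go]; exact rfind_go_lb cs ',' cs.length j (by omega) hc0)
          (le_max_left _ _)
      · exact le_trans (by rw [rfind_char_eq_go]; exact rfind_go_lb cs '.' cs.length j (by omega) hc0)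
          (le_max_right _ _)
    exact le_antisymm (max_le (hub ',' (by simp [isSep])) (hub '.' (by simp [isSep]))) hlow

theorem getLast?_cons_of_ne_nil {α : Type} (a : α) (l : List α) (h : l ≠ []) :
    (a :: l).getLast? = l.getLast? := by
  cases l with
  | nil => exact absurd rfl h
  | cons b t => simp [List.getLast?_cons_cons]

/-- separators list with offset: its last element -/
theorem seps_getLast? (cs : List Char) (st : Int) :
    ((PySem.List.enumerate cs st).filterMap
        (fun ic => if ic.2 = ',' ∨ ic.2 = '.' then some ic.1 else none)).getLast? =
      (lastSep? cs).map (fun j : Nat => st + (j : Int)) := by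
  induction cs generalizing st with
  | nil => simp [PySem.List.enumerate, lastSep?]
  | cons c cs ih =>
    rw [PySem.List.enumerate_cons, List.filterMap_cons]
    cases hcs : lastSep? cs with
    | some j =>
      have ihs := ih (st + 1)
      rw [hcs] at ihs
      have hne : ((PySem.List.enumerate cs (st + 1)).filterMap
          (fun ic => if ic.2 = ',' ∨ ic.2 = '.' then some ic.1 else none)) ≠ [] := by
        intro h0; rw [h0] at ihs; simp at ihs
      by_cases hsep : (c = ',' ∨ c = '.')
      · simp only [if_pos hsep]
        rw [getLast?_cons_of_ne_nil _ _ hne, ihs]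
        simp only [lastSep?, hcs, Option.map_some, Option.some_inj]
        push_cast
        ring
      · simp only [if_neg hsep]
        rw [ihs]
        simp only [lastSep?, hcs, Option.map_some, Option.some_inj]
        push_cast
        ring
    | none =>
      have ihs := ih (st + 1)
      rw [hcs] at ihs
      simp only [Option.map_none] at ihs
      have hnil : ((PySem.List.enumerate cs (st + 1)).filterMap
          (fun ic => if ic.2 = ',' ∨ ic.2 = '.' then some ic.1 else none)) = [] :=
        List.getLast?_eq_none_iff.mp ihs
      by_cases hsep : (c = ',' ∨ c = '.')
      · simp only [if_pos hsep, hnil]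
        have hc : isSep c = true := (isSep_iff c).mpr hsep
        simp [lastSep?, hcs, hc]
      · simp only [if_neg hsep, hnil]
        have hc : isSep c = false := by
          rcases Bool.eq_false_or_eq_true (isSep c) with h | h
          · exact absurd ((isSep_iff c).mp h) hsep
          · exact h
        simp [lastSep?, hcs, hc]

/-- prefix part: indices below the last separator -/
theorem flatMap_prefix (lsp : Int) (xs : List Char) (st : Int) (h : st + xs.length ≤ lsp) :
    (PySem.List.enumerate xs st).flatMap
        (fun ic => if ic.2 = ',' ∨ ic.2 = '.' then (if ic.1 = lsp then ['.'] else []) else [ic.2]) =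
      xs.filter (fun c => decide (¬ (c = ',' ∨ c = '.'))) := by
  induction xs generalizing st with
  | nil => simp [PySem.List.enumerate]
  | cons c xs ih =>
    rw [PySem.List.enumerate_cons, List.flatMap_cons]
    have hlen : (st + 1) + (xs.length : Int) ≤ lsp := by
      simp only [List.length_cons] at h
      push_cast at h ⊢
      omega
    have hne : st ≠ lsp := by
      have h0 : (0 : Int) ≤ (xs.length : Int) := Int.natCast_nonneg _
      omega
    by_cases hsep : (c = ',' ∨ c = '.')
    · have hdec : (decide ¬(c = ',' ∨ c = '.')) = false := decide_eq_false (not_not_intro hsep)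
      simp only [if_pos hsep, if_neg hne, List.nil_append]
      rw [ih (st + 1) hlen, List.filter_cons, hdec]
      simp
    · have hdec : (decide ¬(c = ',' ∨ c = '.')) = true := decide_eq_true hsep
      simp only [if_neg hsep]
      rw [ih (st + 1) hlen, List.filter_cons, hdec]
      simp

/-- suffix part: no separators, characters are copied verbatim -/
theorem flatMap_suffix (lsp : Int) (xs : List Char) (st : Int) (h : ∀ c ∈ xs, isSep c = false) :
    (PySem.List.enumerate xs st).flatMap
        (fun ic => if ic.2 = ',' ∨ ic.2 = '.' then (if ic.1 = lsp then ['.'] else []) else [ic.2]) =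
      xs := by
  induction xs generalizing st with
  | nil => simp [PySem.List.enumerate]
  | cons c xs ih =>
    rw [PySem.List.enumerate_cons, List.flatMap_cons]
    have hc : ¬ (c = ',' ∨ c = '.') := by
      intro hor
      have := h c (List.mem_cons_self)
      rw [(isSep_iff c).mpr hor] at this
      cases this
    simp only [if_neg hc]
    rw [ih (st + 1) (fun d hd => h d (List.mem_cons_of_mem _ hd))]
    rfl

theorem getLast!_of_getLast? (l : List Int) (x : Int) (h : l.getLast? = some x) :
    l.getLast! = x := by
  cases l with
  | nil => cases h
  | cons a t =>
    rw [List.getLast?_eq_some_getLast (by simp : (a :: t) ≠ [])] at h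
    -- `getLast!` on a cons is definitionally `getLast`
    exact Option.some_inj.mp h

-- ===== VERDICT (by name: the statement is the Claim_ definition above) =====
theorem process_base_part_py_spec : Claim_equal_process_base_part_py := by
  intro s _
  unfold Spec_process_base_part_py process_base_part_py process_base_part_py_alt
  have hcomma : ("," : String).toList = [','] := rfl
  have hdot : ("." : String).toList = ['.'] := rfl
  simp only [PySem.Str.rfind_eq, hcomma, hdot]
  rw [max_rfind_eq s.toList]
  have hseps := seps_getLast? s.toList 0
  cases hls : lastSep? s.toList with
  | none =>
    rw [hls] at hseps
    simp only [Option.map_none] at hseps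
    have hnil := List.getLast?_eq_none_iff.mp hseps
    rw [hnil]
    simp
  | some j =>
    rw [hls] at hseps
    simp only [Option.map_some] at hseps
    have hne : ((PySem.List.enumerate s.toList 0).filterMap
        (fun ic => if ic.2 = ',' ∨ ic.2 = '.' then some ic.1 else none)) ≠ [] := by
      intro h0; rw [h0] at hseps; cases hseps
    have hlast : ((PySem.List.enumerate s.toList 0).filterMap
        (fun ic => if ic.2 = ',' ∨ ic.2 = '.' then some ic.1 else none)).getLast! = (j : Int) := by
      have := getLast!_of_getLast? _ _ hseps
      simpa using this
    obtain ⟨c0, hc0, hsep0⟩ := lastSep?_mem s.toList j hls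
    have hjlen : j < s.toList.length := by
      by_contra hge
      rw [List.getElem?_eq_none (by omega)] at hc0
      cases hc0
    have hnotneg : ¬ ((j : Int) = -1) := by omega
    simp only [List.isEmpty_iff, if_neg hne, if_neg hnotneg, hlast]
    -- rewrite A's foldl as a flatMap
    have hfun : (fun (acc : List Char) (ic : Int × Char) =>
        if ic.2 = ',' ∨ ic.2 = '.' then
          if ic.1 = (j : Int) then acc ++ ['.'] else acc
        else acc ++ [ic.2]) =
        (fun (acc : List Char) (ic : Int × Char) => acc ++
          (if ic.2 = ',' ∨ ic.2 = '.' then (if ic.1 = (j : Int) then ['.'] else []) else [ic.2])) := by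
      funext acc ic
      split_ifs <;> simp
    rw [hfun, PySem.List.foldl_append_eq_flatMap, List.nil_append]
    -- decompose the string at the last separator
    have hdecomp : s.toList = s.toList.take j ++ s.toList[j] :: s.toList.drop (j + 1) := by
      conv_lhs => rw [← List.take_append_drop j s.toList]
      rw [List.drop_eq_getElem_cons hjlen]
    have hgetj : s.toList[j] = c0 := by
      have := List.getElem?_eq_getElem hjlen
      rw [hc0] at this
      exact (Option.some_inj.mp this.symm)
    have htakelen : (s.toList.take j).length = j := by
      rw [List.length_take]
      omega
    conv_lhs => rw [hdecomp]
    rw [PySem.List.enumerate_append, PySem.List.enumerate_cons, List.flatMap_append,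
      List.flatMap_cons]
    rw [flatMap_prefix (j : Int) (s.toList.take j) 0 (by rw [htakelen]; omega)]
    simp only [htakelen, zero_add]
    rw [hgetj, if_pos ((isSep_iff c0).mp hsep0), if_pos trivial]
    have hsuffall : ∀ c ∈ s.toList.drop (j + 1), isSep c = false := by
      intro d hd
      obtain ⟨k, hk⟩ := List.getElem?_of_mem hd
      rw [List.getElem?_drop] at hk
      exact lastSep?_last s.toList j hls (j + 1 + k) (by omega) d hk
    rw [flatMap_suffix (j : Int) (s.toList.drop (j + 1)) ((j : Int) + 1) hsuffall]
    -- B side: slices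
    have hsl1 : PySem.List.slice s.toList none (some (j : Int)) = s.toList.take j :=
      PySem.List.slice_to_natCast s.toList j
    have hsl2 : PySem.List.slice s.toList (some ((j : Int) + 1)) none = s.toList.drop (j + 1) := by
      have : ((j : Int) + 1) = ((j + 1 : Nat) : Int) := by push_cast; ring
      rw [this, PySem.List.slice_from_natCast]
    rw [hsl1, hsl2]
    simp
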